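-- pv_equiv track=rewrite | github.com/eliray01/Wikipedia-Search-Engine | augment.py | generated_text_to_queries
-- ===== SOURCE A (Python) =====
-- def generated_text_to_queries(generated_text):
--     #splits each generated text into a new line and saves it to lines
--     lines = generated_text.splitlines()
--     #insitalise empty list called queries which will store the final queries
--     queries = []
--     #intialise capture and set it to false this is to control when to start capturing liens
--     capture = False
--     #for loop which will loop over each line of text within lines
--     for line in lines:
--         #if the current line is equal to assistant in lower case then set capture to True
--         if line.strip().lower() == "assistant":
--             capture = True
--             continue
--         #if capture is true and line.strip() (.strip() removes trailing and leading empty spaces) is not empty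
--         #then append line.strip() (line with no empty spaces) to the list of queries
--         if capture and line.strip():
--             queries.append(line.strip())
--     #return the list of queries
--     return queries
-- ===== SOURCE B (Python) =====
-- def generated_text_to_queries(generated_text):
--     lines = generated_text.splitlines()
--     idx = next((k for k, l in enumerate(lines) if l.strip().lower() == "assistant"), None)
--     if idx is None:
--         return []
--     return [s for s in (l.strip() for l in lines[idx + 1:])
--             if s and s.lower() != "assistant"]
-- ===== Notes on version B (the rewrite author's own statement) =====
-- stated objective: alternative
-- what changed: Replaces A's single stateful capture-flag loop with a marker search (first index of an 'assistant' line) followed by a map/filter comprehension over the slice after it.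
import Mathlib
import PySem

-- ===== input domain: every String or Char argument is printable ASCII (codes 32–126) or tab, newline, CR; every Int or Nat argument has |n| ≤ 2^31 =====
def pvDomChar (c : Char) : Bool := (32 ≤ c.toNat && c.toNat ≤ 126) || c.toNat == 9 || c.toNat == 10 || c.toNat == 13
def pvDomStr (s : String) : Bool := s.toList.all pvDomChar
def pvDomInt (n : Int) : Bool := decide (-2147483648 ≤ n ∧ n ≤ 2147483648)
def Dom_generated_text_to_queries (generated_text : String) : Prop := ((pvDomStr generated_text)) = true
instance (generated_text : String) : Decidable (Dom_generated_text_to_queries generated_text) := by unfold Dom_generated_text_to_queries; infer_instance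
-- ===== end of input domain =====

-- B replaces A's stateful capture-flag loop with a marker search plus a map/filter over the slice after it (alternative decomposition, same cost).
-- ===== PORT A =====
-- step of A's for-loop: state = (queries, capture)
def pvAStep (st : List String × Bool) (line : String) : List String × Bool :=
  if PySem.Str.lower (PySem.Str.strip line) = "assistant" then (st.1, true)
  else if st.2 && (PySem.Str.strip line ≠ "") then (st.1 ++ [PySem.Str.strip line], st.2)
  else st

def generated_text_to_queries (generated_text : String) : List String :=
  let lines := PySem.Str.splitlines generated_text
  (lines.foldl pvAStep ([], false)).1

-- ===== PORT B =====
def generated_text_to_queries_alt (generated_text : String) : List String :=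
  let lines := PySem.Str.splitlines generated_text
  match lines.findIdx? (fun l => PySem.Str.lower (PySem.Str.strip l) = "assistant") with
  | none => []
  | some i =>
      ((lines.drop (i + 1)).map (fun l => PySem.Str.strip l)).filter
        (fun s => s ≠ "" && PySem.Str.lower s ≠ "assistant")
-- ===== PRECONDITION & SPEC =====
def Spec_generated_text_to_queries (generated_text : String) (out : List String) : Prop := out = generated_text_to_queries_alt generated_text
instance (generated_text : String) (out : List String) : Decidable (Spec_generated_text_to_queries generated_text out) := by unfold Spec_generated_text_to_queries; infer_instance

-- ===== CLAIM (what is proved, stated in full; the proofs are below) =====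
def Claim_equal_generated_text_to_queries : Prop := ∀ (generated_text : String), Dom_generated_text_to_queries generated_text → Spec_generated_text_to_queries generated_text (generated_text_to_queries generated_text)

-- ===== LEMMAS AND PROOFS =====

theorem pvA_true (lines : List String) (acc : List String) :
    (lines.foldl pvAStep (acc, true)).1
      = acc ++ (lines.map (fun l => PySem.Str.strip l)).filter
          (fun s => s ≠ "" && PySem.Str.lower s ≠ "assistant") := by
  induction lines generalizing acc with
  | nil => simp
  | cons h t ih =>
    by_cases hm : PySem.Str.lower (PySem.Str.strip h) = "assistant"
    · simp [pvAStep, hm, ih, List.filter_cons]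
    · by_cases he : PySem.Str.strip h = ""
      · simp [pvAStep, hm, he, ih, List.filter_cons]
      · simp [pvAStep, hm, he, ih, List.filter_cons]

theorem pvA_false (lines : List String) :
    (lines.foldl pvAStep ([], false)).1
      = match lines.findIdx? (fun l => PySem.Str.lower (PySem.Str.strip l) = "assistant") with
        | none => []
        | some i => ((lines.drop (i + 1)).map (fun l => PySem.Str.strip l)).filter
            (fun s => s ≠ "" && PySem.Str.lower s ≠ "assistant") := by
  induction lines with
  | nil => simp
  | cons h t ih =>
    by_cases hm : PySem.Str.lower (PySem.Str.strip h) = "assistant"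
    · simp [pvAStep, hm, List.findIdx?_cons, pvA_true]
    · have hstep : pvAStep ([], false) h = ([], false) := by simp [pvAStep, hm]
      rw [List.foldl_cons, hstep, ih, List.findIdx?_cons]
      cases hfi : t.findIdx? (fun l => decide (PySem.Str.lower (PySem.Str.strip l) = "assistant")) with
      | none => simp [hfi, hm]
      | some i => simp [hfi, hm]

-- ===== VERDICT (by name: the statement is the Claim_ definition above) =====
theorem generated_text_to_queries_spec : Claim_equal_generated_text_to_queries := by
  intro s _
  unfold Spec_generated_text_to_queries generated_text_to_queries generated_text_to_queries_alt
  exact pvA_false (PySem.Str.splitlines s)
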